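-- pv_equiv track=rewrite | github.com/LayneIns/MPCNN | utils.py | getWordDict
-- ===== SOURCE A (Python) =====
-- def getWordDict(sentence_list):
-- 	word_dict = dict()
-- 	word_dict['#UNK#'] = len(word_dict)
-- 	word_dict['#head_entity#'] = len(word_dict)
-- 	for sentence in sentence_list:
-- 		words = [word.strip() for word in sentence.split() if word.strip()]
-- 		for word in words:
-- 			if word_dict.get(word, -1) == -1:
-- 				word_dict[word] = len(word_dict)
-- 	return word_dict
-- ===== SOURCE B (Python) =====
-- def getWordDict(sentence_list):
--     tokens = ['#UNK#', '#head_entity#']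
--     for sentence in sentence_list:
--         tokens += sentence.split()
--     first = {w: i for i, w in reversed(list(enumerate(tokens)))}
--     order = sorted(first, key=first.get)
--     return {w: i for i, w in enumerate(order)}
-- ===== Notes on version B (the rewrite author's own statement) =====
-- stated objective: alternative
-- what changed: A assigns indices in one scan with a growing dict used both for membership and for its length; B computes each word's first-occurrence position by overwriting a dict built from the reversed token stream, sorts the distinct words by that position, and enumerates the sorted list.
import Mathlib
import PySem

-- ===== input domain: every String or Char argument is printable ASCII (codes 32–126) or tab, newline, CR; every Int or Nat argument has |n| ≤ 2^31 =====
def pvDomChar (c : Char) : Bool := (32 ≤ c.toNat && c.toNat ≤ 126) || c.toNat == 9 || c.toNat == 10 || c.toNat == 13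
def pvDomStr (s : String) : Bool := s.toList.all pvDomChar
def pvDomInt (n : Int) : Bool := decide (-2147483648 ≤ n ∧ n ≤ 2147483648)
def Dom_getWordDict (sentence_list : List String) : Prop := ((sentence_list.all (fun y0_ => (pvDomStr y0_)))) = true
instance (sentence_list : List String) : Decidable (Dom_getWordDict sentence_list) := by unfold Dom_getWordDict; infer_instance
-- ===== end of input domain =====

-- B replaces A's single scan that assigns indices from a growing dict by a sort-based pipeline:
-- first-occurrence positions via a reversed-overwrite dict, sort the distinct words by position, enumerate (alternative; same result).

-- ===== PORT A =====
def getWordDict (sentence_list : List String) : List (String × Int) :=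
  let word_dict : PySem.Dict String Int := PySem.Dict.empty
  let word_dict := word_dict.insert "#UNK#" (word_dict.size : Int)
  let word_dict := word_dict.insert "#head_entity#" (word_dict.size : Int)
  let word_dict := sentence_list.foldl (fun word_dict sentence =>
    let words := ((PySem.Str.split₀ sentence).filter
        (fun word => !(PySem.Str.strip word == ""))).map (fun word => PySem.Str.strip word)
    words.foldl (fun word_dict word =>
      if word_dict.getD word (-1) == -1 then
        word_dict.insert word (word_dict.size : Int)
      else word_dict) word_dict) word_dict
  word_dict.items

-- ===== PORT B =====
def getWordDict_alt (sentence_list : List String) : List (String × Int) :=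
  let tokens := sentence_list.foldl
    (fun tokens sentence => tokens ++ PySem.Str.split₀ sentence)
    ["#UNK#", "#head_entity#"]
  let first : PySem.Dict String Int :=
    ((PySem.List.enumerate tokens 0).reverse).foldl
      (fun (d : PySem.Dict String Int) p => d.insert p.2 p.1) PySem.Dict.empty
  -- sorted(first, key=first.get): every iterated w is a key of `first`, so first.get(w) is its stored value; getD 0 is exact here
  let order := PySem.List.sorted first.keys (fun w => first.getD w 0) false
  ((PySem.List.enumerate order 0).foldl
      (fun (d : PySem.Dict String Int) p => d.insert p.2 p.1) PySem.Dict.empty).items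

-- ===== PRECONDITION & SPEC =====
def Spec_getWordDict (sentence_list : List String) (out : List (String × Int)) : Prop := out = getWordDict_alt sentence_list
instance (sentence_list : List String) (out : List (String × Int)) : Decidable (Spec_getWordDict sentence_list out) := by unfold Spec_getWordDict; infer_instance

-- ===== CLAIM (what is proved, stated in full; the proofs are below) =====
def Claim_equal_getWordDict : Prop := ∀ (sentence_list : List String), Dom_getWordDict sentence_list → Spec_getWordDict sentence_list (getWordDict sentence_list)

-- ===== LEMMAS AND PROOFS =====

-- the dict pairing the elements of `us` with consecutive indices starting at `s`
def pvMkd (us : List String) (s : Int) : PySem.Dict String Int :=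
  PySem.Dict.mk ((PySem.List.enumerate us s).map (fun p => (p.2, p.1)))

theorem pvGet?_mkd (us : List String) (s : Int) (w : String) :
    (pvMkd us s).get? w = (PySem.List.index? us w).map (fun k : Nat => s + k) := by
  induction us generalizing s with
  | nil => simp [pvMkd, PySem.List.enumerate_nil, PySem.Dict.get?]
  | cons u us ih =>
    rw [PySem.List.index?_eq_idxOf?]
    simp only [pvMkd, PySem.List.enumerate_cons, List.map_cons]
    rw [PySem.Dict.get?_mk_cons]
    by_cases h : u = w
    · subst h; simp [List.idxOf?_cons]
    · have := ih (s + 1)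
      rw [PySem.List.index?_eq_idxOf?] at this
      simp only [pvMkd] at this
      rw [List.idxOf?_cons]
      simp only [beq_iff_eq, h, if_false]
      rw [this]
      cases hx : List.idxOf? w us <;> simp
      omega

theorem pvStep_mkd (us : List String) (w : String) :
    (if (pvMkd us 0).getD w (-1) == -1 then
        (pvMkd us 0).insert w ((pvMkd us 0).size : Int)
      else pvMkd us 0) = pvMkd (PySem.Set.add us w) 0 := by
  rw [PySem.Dict.getD_eq_get?_getD, pvGet?_mkd]
  by_cases hw : w ∈ us
  · rw [PySem.Set.add_of_mem hw]
    rcases (PySem.List.index?_isSome_iff us w).2 hw |> Option.isSome_iff_exists.1 with ⟨k, hk⟩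
    rw [hk]
    have hne : ((0 + (k : Int)) == -1) = false := by
      rw [beq_eq_false_iff_ne]; omega
    simp
  · rw [PySem.Set.add_of_not_mem hw]
    rw [(PySem.List.index?_eq_none_iff us w).2 hw]
    simp only [Option.map_none, Option.getD_none, beq_self_eq_true, if_true]
    apply PySem.Dict.ext
    have hnc : (pvMkd us 0).contains w = false := by
      rw [PySem.Dict.contains_eq_isSome_get?, pvGet?_mkd,
        (PySem.List.index?_eq_none_iff us w).2 hw]
      rfl
    rw [PySem.Dict.items_insert_of_not_contains _ _ hnc]
    simp only [pvMkd, PySem.List.enumerate_append, List.map_append,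
      PySem.List.enumerate_cons, PySem.List.enumerate_nil, List.map_cons, List.map_nil]
    congr 2
    simp [PySem.Dict.size, PySem.List.length_enumerate]

theorem pvFoldl_step_mkd (ws : List String) (us : List String) :
    ws.foldl (fun d w =>
      if d.getD w (-1) == -1 then d.insert w (d.size : Int) else d) (pvMkd us 0)
      = pvMkd (PySem.Set.update us ws) 0 := by
  induction ws generalizing us with
  | nil => simp [PySem.Set.update]
  | cons w ws ih =>
    rw [List.foldl_cons, pvStep_mkd, ih, PySem.Set.update_cons]

-- every token produced by split() is nonempty and whitespace-free
theorem pvGo_tokens (s : List Char) (cur : List Char) (acc : List (List Char))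
    (hacc : ∀ t ∈ acc, t ≠ [] ∧ t.all (fun c => !PySem.Chars.isspace c))
    (hcur : cur.all (fun c => !PySem.Chars.isspace c)) :
    ∀ t ∈ PySem.Chars.split₀.go s cur acc, t ≠ [] ∧ t.all (fun c => !PySem.Chars.isspace c) := by
  induction s generalizing cur acc with
  | nil =>
    intro t ht
    rw [PySem.Chars.split₀.go] at ht
    by_cases hc : cur.isEmpty
    · simp [hc] at ht; exact hacc t ht
    · simp [hc] at ht
      rcases ht with h | h
      · exact hacc t h
      · subst h
        constructor
        · simpa [List.isEmpty_iff] using hc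
        · simpa using hcur
  | cons c rest ih =>
    intro t ht
    rw [PySem.Chars.split₀.go] at ht
    by_cases hs : PySem.Chars.isspace c
    · by_cases hc : cur.isEmpty
      · simp only [hs, hc, if_true] at ht
        exact ih [] acc hacc (by simp) t ht
      · simp only [hs, hc, if_true, if_false, Bool.false_eq_true] at ht
        refine ih [] (cur.reverse :: acc) ?_ (by simp) t ht
        intro u hu
        rcases List.mem_cons.1 hu with h | h
        · subst h
          constructor
          · simpa [List.isEmpty_iff] using hc
          · simpa using hcur
        · exact hacc u h
    · simp only [hs, Bool.false_eq_true, if_false] at ht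
      refine ih (c :: cur) acc hacc ?_ t ht
      simp [hcur, hs]

theorem pvDropWhile_all (p : Char → Bool) (l : List Char)
    (h : l.all (fun c => !p c)) : List.dropWhile p l = l := by
  cases l with
  | nil => rfl
  | cons c cs =>
    simp only [List.all_cons, Bool.and_eq_true, Bool.not_eq_true'] at h
    simp [h.1]

theorem pvStrip_all (t : List Char) (h : t.all (fun c => !PySem.Chars.isspace c)) :
    PySem.Chars.strip t = t := by
  unfold PySem.Chars.strip PySem.Chars.lstrip PySem.Chars.rstrip
  rw [pvDropWhile_all _ _ h, pvDropWhile_all, List.reverse_reverse]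
  simpa using h

theorem pvSplit₀_token (s : String) (w : String) (hw : w ∈ PySem.Str.split₀ s) :
    PySem.Str.strip w = w ∧ w ≠ "" := by
  rcases List.mem_map.1 hw with ⟨t, ht, rfl⟩
  have htok := pvGo_tokens s.toList [] [] (by simp) (by simp) t
    (by simpa [PySem.Chars.split₀] using ht)
  constructor
  · apply String.toList_inj.1
    rw [PySem.Str.toList_strip]
    simp only [String.toList_ofList]
    exact pvStrip_all t htok.2
  · intro hcon
    have : t = [] := by
      have := congrArg String.toList hcon
      simpa using this
    exact htok.1 this

theorem pvWords_eq (s : String) :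
    ((PySem.Str.split₀ s).filter
        (fun word => !(PySem.Str.strip word == ""))).map (fun word => PySem.Str.strip word)
      = PySem.Str.split₀ s := by
  rw [List.filter_eq_self.2]
  · rw [List.map_congr_left (g := id), List.map_id]
    intro w hw; exact (pvSplit₀_token s w hw).1
  · intro w hw
    rcases pvSplit₀_token s w hw with ⟨h1, h2⟩
    simp [h1, h2]

theorem pvFoldl_inner_flat (f : PySem.Dict String Int → String → PySem.Dict String Int)
    (l : List String) (init : PySem.Dict String Int) :
    l.foldl (fun d s => (PySem.Str.split₀ s).foldl f d) init
      = (l.flatMap (fun s => PySem.Str.split₀ s)).foldl f init := by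
  induction l generalizing init with
  | nil => rfl
  | cons x l ih => rw [List.foldl_cons, ih, List.flatMap_cons, List.foldl_append]

-- A's result is the dict enumerating the ordered dedup of specials ++ all tokens
theorem pvA_items (sentence_list : List String) :
    getWordDict sentence_list
      = (pvMkd (PySem.List.dedup
          (["#UNK#", "#head_entity#"] ++ sentence_list.flatMap (fun s => PySem.Str.split₀ s))) 0).items := by
  unfold getWordDict
  simp only [pvWords_eq]
  have hinit :
      ((PySem.Dict.empty : PySem.Dict String Int).insert "#UNK#"
          ((PySem.Dict.empty : PySem.Dict String Int).size : Int)).insert "#head_entity#"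
          ((((PySem.Dict.empty : PySem.Dict String Int).insert "#UNK#"
            ((PySem.Dict.empty : PySem.Dict String Int).size : Int)).size : Int))
        = pvMkd ["#UNK#", "#head_entity#"] 0 := by decide
  rw [hinit, pvFoldl_inner_flat, pvFoldl_step_mkd]
  have hset : PySem.Set.update ["#UNK#", "#head_entity#"]
      (List.flatMap PySem.Str.split₀ sentence_list)
      = PySem.List.dedup (["#UNK#", "#head_entity#"]
          ++ List.flatMap (fun s => PySem.Str.split₀ s) sentence_list) := by
    rw [PySem.List.dedup_eq_ofList, PySem.Set.ofList_append,
      show PySem.Set.ofList ["#UNK#", "#head_entity#"] = ["#UNK#", "#head_entity#"] from by decide]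
  rw [hset]

-- ===== B-side lemmas =====

-- folding inserts keeps, per key, the value of the LAST pair with that key
theorem pvFold_insert_get? (ps : List (Int × String)) (d : PySem.Dict String Int) (w : String) :
    (ps.foldl (fun (d : PySem.Dict String Int) p => d.insert p.2 p.1) d).get? w
      = (match ps.reverse.find? (fun p => p.2 == w) with
         | some p => some p.1
         | none => d.get? w) := by
  induction ps generalizing d with
  | nil => simp
  | cons q ps ih =>
    rw [List.foldl_cons, ih, List.reverse_cons, List.find?_append]
    cases hf : ps.reverse.find? (fun p => p.2 == w) with
    | some p => simp
    | none =>
      by_cases hq : q.2 = w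
      · simp [hq, PySem.Dict.get?_insert_self]
      · simp [hq, PySem.Dict.get?_insert_of_ne _ _ (Ne.symm hq)]

-- the first pair of enumerate whose word is w carries w's first index
theorem pvFind?_enumerate (ts : List String) (s : Int) (w : String) :
    (PySem.List.enumerate ts s).find? (fun p => p.2 == w)
      = (PySem.List.index? ts w).map (fun k : Nat => ((s + k : Int), w)) := by
  induction ts generalizing s with
  | nil => simp [PySem.List.enumerate_nil]
  | cons t ts ih =>
    rw [PySem.List.enumerate_cons, List.find?_cons]
    by_cases h : t = w
    · subst h; simp [List.idxOf?_cons]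
    · rw [PySem.List.index?_cons_of_ne _ h]
      have hb : (((s, t) : Int × String).2 == w) = false := by simpa using h
      simp only [hb]
      rw [ih (s + 1)]
      cases hx : PySem.List.index? ts w
      · simp
      · simp only [Option.map_some, Option.some.injEq, Prod.mk.injEq, and_true]
        push_cast
        omega

-- the `first` dict of B maps each token to its first-occurrence index
theorem pvFirst_get? (ts : List String) (w : String) :
    (((PySem.List.enumerate ts 0).reverse).foldl
        (fun (d : PySem.Dict String Int) p => d.insert p.2 p.1) PySem.Dict.empty).get? w
      = (PySem.List.index? ts w).map (fun k : Nat => (k : Int)) := by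
  rw [pvFold_insert_get?, List.reverse_reverse, pvFind?_enumerate]
  cases hx : PySem.List.index? ts w <;> simp

-- along the ordered dedup, first-occurrence indices strictly increase
theorem pvDedup_pairwise (ts : List String) :
    (PySem.List.dedup ts).Pairwise
      (fun a b => ((PySem.List.index? ts a).getD 0 : Nat) < (PySem.List.index? ts b).getD 0) := by
  induction ts using List.reverseRecOn with
  | nil => simp [PySem.List.dedup]
  | append_singleton ts x ih =>
    have hidx : ∀ w ∈ ts, PySem.List.index? (ts ++ [x]) w = PySem.List.index? ts w := by
      intro w hw; exact PySem.List.index?_append_of_mem _ hw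
    have hded : PySem.List.dedup (ts ++ [x]) = PySem.Set.add (PySem.List.dedup ts) x := by
      rw [PySem.List.dedup_eq_ofList, PySem.List.dedup_eq_ofList, PySem.Set.ofList_append_singleton]
    rw [hded]
    have hmem : ∀ w ∈ PySem.List.dedup ts, w ∈ ts := fun w hw =>
      (PySem.List.mem_dedup ts w).1 hw
    by_cases hx : x ∈ PySem.List.dedup ts
    · rw [PySem.Set.add_of_mem hx]
      refine List.Pairwise.imp_of_mem ?_ ih
      intro a b ha hb hab
      rw [hidx a (hmem a ha), hidx b (hmem b hb)]; exact hab
    · rw [PySem.Set.add_of_not_mem hx]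
      have hxts : x ∉ ts := fun h => hx ((PySem.List.mem_dedup ts x).2 h)
      rw [List.pairwise_append]
      refine ⟨?_, by simp, ?_⟩
      · refine List.Pairwise.imp_of_mem ?_ ih
        intro a b ha hb hab
        rw [hidx a (hmem a ha), hidx b (hmem b hb)]; exact hab
      · intro a ha b hb
        rw [List.mem_singleton] at hb; rw [hb]
        rw [hidx a (hmem a ha), PySem.List.index?_append_singleton_self ts x hxts]
        rcases Option.isSome_iff_exists.1
          ((PySem.List.index?_isSome_iff ts a).2 (hmem a ha)) with ⟨k, hk⟩
        rcases PySem.List.getElem_of_index?_eq_some hk with ⟨hklt, _, _⟩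
        rw [hk]; simpa using hklt

-- B's sorted list of distinct words is exactly the ordered dedup of the tokens
theorem pvOrder_eq (ts : List String) :
    PySem.List.sorted
      (((PySem.List.enumerate ts 0).reverse).foldl
        (fun (d : PySem.Dict String Int) p => d.insert p.2 p.1) PySem.Dict.empty).keys
      (fun w => (((PySem.List.enumerate ts 0).reverse).foldl
        (fun (d : PySem.Dict String Int) p => d.insert p.2 p.1) PySem.Dict.empty).getD w 0) false
      = PySem.List.dedup ts := by
  have hkeys : (((PySem.List.enumerate ts 0).reverse).foldl
      (fun (d : PySem.Dict String Int) p => d.insert p.2 p.1) PySem.Dict.empty).keys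
      = PySem.Set.ofList ts.reverse := by
    have := PySem.Dict.keys_foldl_insert_key
      (l := (PySem.List.enumerate ts 0).reverse)
      (key := fun p : Int × String => p.2) (f := fun _ p => p.1)
      (d := (PySem.Dict.empty : PySem.Dict String Int))
    rw [this]
    rw [show ((PySem.List.enumerate ts 0).reverse).map (fun p : Int × String => p.2)
        = ts.reverse from by rw [List.map_reverse, PySem.List.map_snd_enumerate]]
    rfl
  simp only [hkeys]
  apply PySem.List.sorted_eq_of_perm_of_pairwise_lt
  · refine (List.perm_ext_iff_of_nodup (PySem.List.nodup_dedup ts) ?_).2 ?_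
    · exact PySem.Set.nodup_ofList _
    · intro a
      rw [PySem.List.mem_dedup]
      constructor
      · intro h; exact (PySem.Set.mem_ofList _ _).2 (List.mem_reverse.2 h)
      · intro h; exact List.mem_reverse.1 ((PySem.Set.mem_ofList _ _).1 h)
  · refine List.Pairwise.imp_of_mem ?_ (pvDedup_pairwise ts)
    intro a b ha hb hab
    have hga := pvFirst_get? ts a
    have hgb := pvFirst_get? ts b
    rcases Option.isSome_iff_exists.1
      ((PySem.List.index?_isSome_iff ts a).2 ((PySem.List.mem_dedup ts a).1 ha)) with ⟨ka, hka⟩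
    rcases Option.isSome_iff_exists.1
      ((PySem.List.index?_isSome_iff ts b).2 ((PySem.List.mem_dedup ts b).1 hb)) with ⟨kb, hkb⟩
    rw [hka] at hga; rw [hkb] at hgb
    rw [hka, hkb] at hab
    rw [PySem.Dict.getD_eq_get?_getD, PySem.Dict.getD_eq_get?_getD, hga, hgb]
    simpa using hab

-- B's result is the same enumerated dedup dict
theorem pvB_items (sentence_list : List String) :
    getWordDict_alt sentence_list
      = (pvMkd (PySem.List.dedup
          (["#UNK#", "#head_entity#"] ++ sentence_list.flatMap (fun s => PySem.Str.split₀ s))) 0).items := by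
  unfold getWordDict_alt
  dsimp only
  rw [PySem.List.foldl_append_eq_flatMap, pvOrder_eq]
  have h := PySem.Dict.items_foldl_insert_fresh
    (l := PySem.List.enumerate (PySem.List.dedup
      (["#UNK#", "#head_entity#"] ++ List.flatMap PySem.Str.split₀ sentence_list)) 0)
    (k := fun p : Int × String => p.2) (v := fun p : Int × String => p.1)
    (d := (PySem.Dict.empty : PySem.Dict String Int))
    (by intro a _; exact PySem.Dict.contains_empty _)
    (by rw [PySem.List.map_snd_enumerate]; exact PySem.List.nodup_dedup _)
  rw [h]
  simp [pvMkd, PySem.Dict.empty]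

-- ===== VERDICT (by name: the statement is the Claim_ definition above) =====
theorem getWordDict_spec : Claim_equal_getWordDict := by
  intro sentence_list _
  unfold Spec_getWordDict
  rw [pvA_items, pvB_items]
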